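-- pv_equiv track=rewrite | github.com/charan2308/Leetcode | new.py | max_separations
-- ===== SOURCE A (Python) =====
-- def max_separations(N, arr, k):
--     # Step 1: Calculate the cumulative count of odd and even numbers
--     odd_count = [0] * (N + 1)
--     even_count = [0] * (N + 1)
--
--     for i in range(1, N + 1):
--         odd_count[i] = odd_count[i - 1] + (1 if arr[i - 1] % 2 != 0 else 0)
--         even_count[i] = even_count[i - 1] + (1 if arr[i - 1] % 2 == 0 else 0)
--
--     # Step 2: Identify valid separation points and their costs
--     valid_separations = []
--     for i in range(1, N):
--         if odd_count[i] == even_count[i] and odd_count[N] - odd_count[i] == even_count[N] - even_count[i]: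
--             cost = abs(arr[i] - arr[i - 1])
--             valid_separations.append((cost, i))
--
--     # Step 3: Sort valid separations by cost
--     valid_separations.sort()
--
--     # Step 4: Use dynamic programming to find the maximum number of separations within the given cost k
--     dp = [0] * (k + 1)
--
--     for cost, _ in valid_separations:
--         for j in range(k, cost - 1, -1):
--             dp[j] = max(dp[j], dp[j - cost] + 1)
--
--     # The answer is the maximum number of separations we can achieve within cost k
--     return max(dp)
-- ===== SOURCE B (Python) =====
-- def max_separations(N, arr, k):
--     # Greedy: a prefix [0:i) is a valid cut iff it has equally many odds and
--     # evens and the remainder does too (i.e. the whole of arr[:N] is balanced).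
--     # Maximising the number of cuts within budget k with nonnegative costs is
--     # achieved by taking the cheapest cuts first.
--     if N <= 0:
--         return 0
--     balance = 0
--     costs = []
--     for i in range(1, N):
--         balance += 1 if arr[i - 1] % 2 != 0 else -1
--         if balance == 0:
--             costs.append(abs(arr[i] - arr[i - 1]))
--     balance += 1 if arr[N - 1] % 2 != 0 else -1
--     if balance != 0:
--         return 0
--     costs.sort()
--     count = 0
--     budget = k
--     for c in costs:
--         if c <= budget:
--             budget -= c
--             count += 1
--     return count
-- ===== Notes on version B (the rewrite author's own statement) =====
-- stated objective: faster
-- what changed: B replaces A's prefix-count arrays plus 0/1-knapsack DP over the budget (dp table of size k+1 updated per cut) by a single balance-tracking pass that collects cut costs and a greedy pass that takes the cheapest cuts until the budget k is exhausted; since all costs are nonnegative and the value of every cut is 1, the greedy choice is exact.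
import Mathlib
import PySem

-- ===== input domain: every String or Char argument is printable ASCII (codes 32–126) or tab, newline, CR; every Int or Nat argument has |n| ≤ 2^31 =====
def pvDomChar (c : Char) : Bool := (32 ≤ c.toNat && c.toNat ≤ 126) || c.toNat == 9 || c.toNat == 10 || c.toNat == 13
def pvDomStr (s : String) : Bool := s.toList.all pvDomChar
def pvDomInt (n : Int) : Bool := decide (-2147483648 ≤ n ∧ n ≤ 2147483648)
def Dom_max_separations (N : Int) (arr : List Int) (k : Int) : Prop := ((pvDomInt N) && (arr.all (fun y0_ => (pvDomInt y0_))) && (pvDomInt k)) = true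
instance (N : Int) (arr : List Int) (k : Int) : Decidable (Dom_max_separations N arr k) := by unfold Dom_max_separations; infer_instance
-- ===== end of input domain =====

-- B replaces A's prefix-count arrays + 0/1-knapsack DP over the budget by one balance pass
-- collecting cut costs and a greedy cheapest-first pass (exact, since costs ≥ 0 and each cut counts 1).

-- ===== PORT A =====
-- The Python arrays odd_count/even_count are written once at index i in iteration i and read only
-- at already-written indices, so they are ported as lists grown by one element per iteration.
def pvA_cstep (arr : List Int) (st : List Int × List Int) (i : Int) : List Int × List Int :=
  let a := PySem.List.pyGetD arr (i - 1) 0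
  (st.1 ++ [PySem.List.pyGetD st.1 (i - 1) 0 + (if PySem.Int.mod a 2 ≠ 0 then 1 else 0)],
   st.2 ++ [PySem.List.pyGetD st.2 (i - 1) 0 + (if PySem.Int.mod a 2 = 0 then 1 else 0)])

def pvA_vstep (N : Int) (arr : List Int) (cnts : List Int × List Int)
    (acc : List (Int × Int)) (i : Int) : List (Int × Int) :=
  if PySem.List.pyGetD cnts.1 i 0 = PySem.List.pyGetD cnts.2 i 0 ∧
     PySem.List.pyGetD cnts.1 N 0 - PySem.List.pyGetD cnts.1 i 0 =
       PySem.List.pyGetD cnts.2 N 0 - PySem.List.pyGetD cnts.2 i 0 then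
    acc ++ [(|PySem.List.pyGetD arr i 0 - PySem.List.pyGetD arr (i - 1) 0|, i)]
  else acc

def pvA_inner (k c : Int) (dp : List Int) : List Int :=
  (PySem.List.pyRange k (c - 1) (-1)).foldl
    (fun dp j =>
      PySem.List.pySetD dp j (max (PySem.List.pyGetD dp j 0) (PySem.List.pyGetD dp (j - c) 0 + 1)))
    dp

def max_separations (N : Int) (arr : List Int) (k : Int) : Int :=
  let cnts := (PySem.List.pyRange 1 (N + 1) 1).foldl (pvA_cstep arr) ([0], [0])
  let vs := (PySem.List.pyRange 1 N 1).foldl (pvA_vstep N arr cnts) []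
  let svs := PySem.List.sorted2 vs (fun p => p.1) (fun p => p.2)
  let dp0 : List Int := List.replicate (k + 1).toNat 0
  let dp := svs.foldl (fun dp p => pvA_inner k p.1 dp) dp0
  -- max(dp): Python raises ValueError on an empty dp (k < 0); that case is outside Pre_.
  match PySem.List.max? dp (fun x => x) with
  | some m => m
  | none => 0

-- ===== PORT B =====
def pvB_cstep (arr : List Int) (st : Int × List Int) (i : Int) : Int × List Int :=
  let balance := st.1 + (if PySem.Int.mod (PySem.List.pyGetD arr (i - 1) 0) 2 ≠ 0 then 1 else -1)
  (balance,
   if balance = 0 then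
     st.2 ++ [|PySem.List.pyGetD arr i 0 - PySem.List.pyGetD arr (i - 1) 0|]
   else st.2)

def pvB_gstep (st : Int × Int) (c : Int) : Int × Int :=
  if c ≤ st.2 then (st.1 + 1, st.2 - c) else st

def max_separations_alt (N : Int) (arr : List Int) (k : Int) : Int :=
  if N ≤ 0 then 0
  else
    let st := (PySem.List.pyRange 1 N 1).foldl (pvB_cstep arr) (0, [])
    let balance := st.1 + (if PySem.Int.mod (PySem.List.pyGetD arr (N - 1) 0) 2 ≠ 0 then 1 else -1)
    if balance ≠ 0 then 0
    else
      let costs := PySem.List.sorted st.2 (fun c => c)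
      (costs.foldl pvB_gstep (0, k)).1

-- ===== PRECONDITION & SPEC =====
-- Pre_ excludes exactly the inputs where A raises: IndexError when 0 < N > len(arr),
-- and ValueError from max([]) when k < 0.
def Pre_max_separations (N : Int) (arr : List Int) (k : Int) : Prop :=
  (N ≤ (arr.length : Int) ∨ N ≤ 0) ∧ 0 ≤ k
instance (N : Int) (arr : List Int) (k : Int) : Decidable (Pre_max_separations N arr k) := by
  unfold Pre_max_separations; infer_instance

def pvWitness_max_separations : Int × List Int × Int := (4, [1, 2, 3, 4], 3)


def Spec_max_separations (N : Int) (arr : List Int) (k : Int) (out : Int) : Prop :=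
  out = max_separations_alt N arr k
instance (N : Int) (arr : List Int) (k : Int) (out : Int) : Decidable (Spec_max_separations N arr k out) := by
  unfold Spec_max_separations; infer_instance

-- ===== CLAIM (what is proved, stated in full; the proofs are below) =====
def Claim_equal_max_separations : Prop := ∀ (N : Int) (arr : List Int) (k : Int), Dom_max_separations N arr k → Pre_max_separations N arr k → Spec_max_separations N arr k (max_separations N arr k)

-- ===== LEMMAS AND PROOFS =====

-- odd/even counts of a prefix, and the reference cost list both programs compute
def pvOddc (l : List Int) : Int := ((l.countP fun a => decide (PySem.Int.mod a 2 ≠ 0) : Nat) : Int)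
def pvEvenc (l : List Int) : Int := ((l.countP fun a => decide (PySem.Int.mod a 2 = 0) : Nat) : Int)
def pvCostf (arr : List Int) (i : Int) : Int :=
  |PySem.List.pyGetD arr i 0 - PySem.List.pyGetD arr (i - 1) 0|
def pvRefCosts (arr : List Int) (N : Int) : List Int :=
  ((PySem.List.pyRange 1 N 1).filter
    (fun i => decide (pvOddc (arr.take i.toNat) - pvEvenc (arr.take i.toNat) = 0))).map (pvCostf arr)
def pvRefPairs (arr : List Int) (N : Int) : List (Int × Int) :=
  ((PySem.List.pyRange 1 N 1).filter
    (fun i => decide (pvOddc (arr.take i.toNat) - pvEvenc (arr.take i.toNat) = 0))).map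
    (fun i => (pvCostf arr i, i))

-- number of items a greedy cheapest-first pass takes from cs within budget j
def pvMaxTake : List Int → Int → ℕ
  | [], _ => 0
  | c :: cs, j => if c ≤ j then pvMaxTake cs (j - c) + 1 else 0

theorem pvOddc_take_succ (arr : List Int) (m : ℕ) (h : m < arr.length) :
    pvOddc (arr.take (m + 1)) =
      pvOddc (arr.take m) + (if PySem.Int.mod arr[m] 2 ≠ 0 then 1 else 0) := by
  rw [List.take_add_one, List.getElem?_eq_getElem h]
  simp only [pvOddc, List.countP_append, Option.toList_some, List.countP_singleton]
  split <;> rename_i hx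
  · rw [if_pos (by simpa using hx)]; push_cast; ring
  · rw [if_neg (by simpa using hx)]; push_cast; ring

theorem pvEvenc_take_succ (arr : List Int) (m : ℕ) (h : m < arr.length) :
    pvEvenc (arr.take (m + 1)) =
      pvEvenc (arr.take m) + (if PySem.Int.mod arr[m] 2 = 0 then 1 else 0) := by
  rw [List.take_add_one, List.getElem?_eq_getElem h]
  simp only [pvEvenc, List.countP_append, Option.toList_some, List.countP_singleton]
  split <;> rename_i hx
  · rw [if_pos (by simpa using hx)]; push_cast; ring
  · rw [if_neg (by simpa using hx)]; push_cast; ring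

-- Step 1 of A: the count arrays hold the prefix counts
theorem pvCountsA (arr : List Int) (m : ℕ) (hm : m ≤ arr.length) :
    (PySem.List.pyRange 1 ((m : Int) + 1) 1).foldl (pvA_cstep arr) ([0], [0]) =
      ((List.range (m + 1)).map (fun t => pvOddc (arr.take t)),
       (List.range (m + 1)).map (fun t => pvEvenc (arr.take t))) := by
  induction m with
  | zero =>
    rw [show ((0 : ℕ) : Int) + 1 = 1 by norm_num, PySem.List.pyRange_one_eq_nil (le_refl 1)]
    simp [pvOddc, pvEvenc]
  | succ m ih =>
    have hm' : m ≤ arr.length := by omega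
    have hmlt : m < arr.length := by omega
    have hcast : ((m + 1 : ℕ) : Int) + 1 = ((m : Int) + 1) + 1 := by push_cast; ring
    rw [hcast, PySem.List.pyRange_one_succ_right (by omega), List.foldl_append, ih hm']
    simp only [List.foldl_cons, List.foldl_nil, pvA_cstep]
    rw [show (m : Int) + 1 - 1 = (m : Int) by ring]
    simp only [PySem.List.pyGetD_natCast]
    rw [PySem.List.getD_map_range (fun t => pvOddc (arr.take t)) (m + 1) m 0 (by omega),
        PySem.List.getD_map_range (fun t => pvEvenc (arr.take t)) (m + 1) m 0 (by omega),
        List.getD_eq_getElem arr 0 hmlt]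
    refine Prod.ext ?_ ?_ <;> simp only
    · conv_rhs => rw [List.range_succ, List.map_append, List.map_singleton]
      rw [pvOddc_take_succ arr m hmlt]
    · conv_rhs => rw [List.range_succ, List.map_append, List.map_singleton]
      rw [pvEvenc_take_succ arr m hmlt]

-- Step 2 of B: the balance pass returns the running balance and the reference cost list
theorem pvBfold (arr : List Int) (m : ℕ) (hm : m ≤ arr.length) :
    (PySem.List.pyRange 1 ((m : Int) + 1) 1).foldl (pvB_cstep arr) (0, []) =
      (pvOddc (arr.take m) - pvEvenc (arr.take m), pvRefCosts arr ((m : Int) + 1)) := by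
  induction m with
  | zero =>
    rw [show ((0 : ℕ) : Int) + 1 = 1 by norm_num, PySem.List.pyRange_one_eq_nil (le_refl 1)]
    simp [pvOddc, pvEvenc, pvRefCosts, PySem.List.pyRange_one_eq_nil (le_refl 1)]
  | succ m ih =>
    have hm' : m ≤ arr.length := by omega
    have hmlt : m < arr.length := by omega
    conv_lhs => rw [show ((m + 1 : ℕ) : Int) + 1 = ((m : Int) + 1) + 1 by push_cast; ring,
                    PySem.List.pyRange_one_succ_right (by omega)]
    rw [List.foldl_append, ih hm']
    simp only [List.foldl_cons, List.foldl_nil, pvB_cstep]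
    have eget : PySem.List.pyGetD arr ((m : Int) + 1 - 1) 0 = (arr[m] : Int) := by
      rw [show (m : Int) + 1 - 1 = (m : Int) by ring]
      simp only [PySem.List.pyGetD_natCast]
      exact List.getD_eq_getElem arr 0 hmlt
    rw [eget]
    have hbal : pvOddc (arr.take m) - pvEvenc (arr.take m) +
        (if PySem.Int.mod arr[m] 2 ≠ 0 then 1 else -1) =
        pvOddc (arr.take (m + 1)) - pvEvenc (arr.take (m + 1)) := by
      rw [pvOddc_take_succ arr m hmlt, pvEvenc_take_succ arr m hmlt]
      by_cases hx : PySem.Int.mod arr[m] 2 ≠ 0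
      · rw [if_pos hx, if_pos hx, if_neg hx]; omega
      · rw [if_neg hx, if_neg hx, if_pos (not_not.mp hx)]; omega
    rw [hbal]
    refine Prod.ext rfl ?_
    have hrc : pvRefCosts arr (((m + 1 : ℕ) : Int) + 1) =
        pvRefCosts arr ((m : Int) + 1) ++
          (if pvOddc (arr.take (m + 1)) - pvEvenc (arr.take (m + 1)) = 0 then
            [|PySem.List.pyGetD arr ((m : Int) + 1) 0 - (arr[m] : Int)|] else []) := by
      simp only [pvRefCosts]
      rw [show ((m + 1 : ℕ) : Int) + 1 = ((m : Int) + 1) + 1 by push_cast; ring]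
      rw [PySem.List.pyRange_one_succ_right (a := 1) (b := (m : Int) + 1) (by omega),
          List.filter_append, List.map_append]
      congr 1
      simp only [List.filter_cons, List.filter_nil]
      rw [show ((m : Int) + 1).toNat = m + 1 by omega]
      by_cases hz : pvOddc (arr.take (m + 1)) - pvEvenc (arr.take (m + 1)) = 0
      · rw [if_pos (decide_eq_true hz)]
        simp only [List.map_cons, List.map_nil, pvCostf]
        rw [eget, if_pos hz]
      · rw [if_neg (by simpa using hz)]
        simp only [List.map_nil]
        rw [if_neg hz]
    rw [hrc]
    by_cases hz : pvOddc (arr.take (m + 1)) - pvEvenc (arr.take (m + 1)) = 0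
    · rw [if_pos hz, if_pos hz]
    · rw [if_neg hz, if_neg hz, List.append_nil]

-- Step 2 of A, balanced total: the valid separations are the reference costs paired with their indices
theorem pvVsA_bal (arr : List Int) (N : Int) (h1 : 1 ≤ N) (hm : N ≤ (arr.length : Int))
    (htot : pvOddc (arr.take N.toNat) - pvEvenc (arr.take N.toNat) = 0) :
    (PySem.List.pyRange 1 N 1).foldl
        (pvA_vstep N arr ((List.range (N.toNat + 1)).map (fun t => pvOddc (arr.take t)),
                          (List.range (N.toNat + 1)).map (fun t => pvEvenc (arr.take t)))) [] =
      pvRefPairs arr N := by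
  unfold pvRefPairs
  rw [show pvA_vstep N arr
        ((List.range (N.toNat + 1)).map (fun t => pvOddc (arr.take t)),
         (List.range (N.toNat + 1)).map (fun t => pvEvenc (arr.take t))) =
      (fun (acc : List (Int × Int)) (i : Int) =>
        if PySem.List.pyGetD ((List.range (N.toNat + 1)).map (fun t => pvOddc (arr.take t))) i 0 =
             PySem.List.pyGetD ((List.range (N.toNat + 1)).map (fun t => pvEvenc (arr.take t))) i 0 ∧
           PySem.List.pyGetD ((List.range (N.toNat + 1)).map (fun t => pvOddc (arr.take t))) N 0 -
             PySem.List.pyGetD ((List.range (N.toNat + 1)).map (fun t => pvOddc (arr.take t))) i 0 =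
           PySem.List.pyGetD ((List.range (N.toNat + 1)).map (fun t => pvEvenc (arr.take t))) N 0 -
             PySem.List.pyGetD ((List.range (N.toNat + 1)).map (fun t => pvEvenc (arr.take t))) i 0 then
          acc ++ [(|PySem.List.pyGetD arr i 0 - PySem.List.pyGetD arr (i - 1) 0|, i)]
        else acc) from rfl]
  rw [PySem.List.foldl_append_ite, List.nil_append]
  refine congrArg₂ List.map ?_ ?_
  · funext i
    simp [pvCostf]
  refine List.filter_congr ?_
  intro i hi
  have hmem := (PySem.List.mem_pyRange_one).mp hi
  have h1 : PySem.List.pyGetD ((List.range (N.toNat + 1)).map (fun t => pvOddc (arr.take t))) i 0 =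
        pvOddc (arr.take i.toNat) := by
      rw [PySem.List.pyGetD_of_nonneg _ _ (by omega)]
      exact PySem.List.getD_map_range _ _ _ _ (by omega)
  have h2 : PySem.List.pyGetD ((List.range (N.toNat + 1)).map (fun t => pvEvenc (arr.take t))) i 0 =
      pvEvenc (arr.take i.toNat) := by
    rw [PySem.List.pyGetD_of_nonneg _ _ (by omega)]
    exact PySem.List.getD_map_range _ _ _ _ (by omega)
  have h3 : PySem.List.pyGetD ((List.range (N.toNat + 1)).map (fun t => pvOddc (arr.take t))) N 0 =
      pvOddc (arr.take N.toNat) := by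
    rw [PySem.List.pyGetD_of_nonneg _ _ (by omega)]
    exact PySem.List.getD_map_range _ _ _ _ (by omega)
  have h4 : PySem.List.pyGetD ((List.range (N.toNat + 1)).map (fun t => pvEvenc (arr.take t))) N 0 =
      pvEvenc (arr.take N.toNat) := by
    rw [PySem.List.pyGetD_of_nonneg _ _ (by omega)]
    exact PySem.List.getD_map_range _ _ _ _ (by omega)
  rw [h1, h2, h3, h4]
  exact decide_eq_decide.mpr ⟨fun h => by omega, fun h => ⟨by omega, by omega⟩⟩

-- Step 2 of A, unbalanced total: no valid separations
theorem pvVsA_unbal (arr : List Int) (N : Int) (h1 : 1 ≤ N) (hm : N ≤ (arr.length : Int))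
    (htot : pvOddc (arr.take N.toNat) - pvEvenc (arr.take N.toNat) ≠ 0) :
    (PySem.List.pyRange 1 N 1).foldl
        (pvA_vstep N arr ((List.range (N.toNat + 1)).map (fun t => pvOddc (arr.take t)),
                          (List.range (N.toNat + 1)).map (fun t => pvEvenc (arr.take t)))) [] = [] := by
  rw [show pvA_vstep N arr
        ((List.range (N.toNat + 1)).map (fun t => pvOddc (arr.take t)),
         (List.range (N.toNat + 1)).map (fun t => pvEvenc (arr.take t))) =
      (fun (acc : List (Int × Int)) (i : Int) =>
        if PySem.List.pyGetD ((List.range (N.toNat + 1)).map (fun t => pvOddc (arr.take t))) i 0 =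
             PySem.List.pyGetD ((List.range (N.toNat + 1)).map (fun t => pvEvenc (arr.take t))) i 0 ∧
           PySem.List.pyGetD ((List.range (N.toNat + 1)).map (fun t => pvOddc (arr.take t))) N 0 -
             PySem.List.pyGetD ((List.range (N.toNat + 1)).map (fun t => pvOddc (arr.take t))) i 0 =
           PySem.List.pyGetD ((List.range (N.toNat + 1)).map (fun t => pvEvenc (arr.take t))) N 0 -
             PySem.List.pyGetD ((List.range (N.toNat + 1)).map (fun t => pvEvenc (arr.take t))) i 0 then
          acc ++ [(|PySem.List.pyGetD arr i 0 - PySem.List.pyGetD arr (i - 1) 0|, i)]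
        else acc) from rfl]
  rw [PySem.List.foldl_append_ite, List.nil_append]
  rw [List.filter_eq_nil_iff.mpr ?hnone]
  case hnone =>
    intro i hi
    have hmem := (PySem.List.mem_pyRange_one).mp hi
    have h1 : PySem.List.pyGetD ((List.range (N.toNat + 1)).map (fun t => pvOddc (arr.take t))) i 0 =
        pvOddc (arr.take i.toNat) := by
      rw [PySem.List.pyGetD_of_nonneg _ _ (by omega)]
      exact PySem.List.getD_map_range _ _ _ _ (by omega)
    have h2 : PySem.List.pyGetD ((List.range (N.toNat + 1)).map (fun t => pvEvenc (arr.take t))) i 0 =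
        pvEvenc (arr.take i.toNat) := by
      rw [PySem.List.pyGetD_of_nonneg _ _ (by omega)]
      exact PySem.List.getD_map_range _ _ _ _ (by omega)
    have h3 : PySem.List.pyGetD ((List.range (N.toNat + 1)).map (fun t => pvOddc (arr.take t))) N 0 =
        pvOddc (arr.take N.toNat) := by
      rw [PySem.List.pyGetD_of_nonneg _ _ (by omega)]
      exact PySem.List.getD_map_range _ _ _ _ (by omega)
    have h4 : PySem.List.pyGetD ((List.range (N.toNat + 1)).map (fun t => pvEvenc (arr.take t))) N 0 =
        pvEvenc (arr.take N.toNat) := by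
      rw [PySem.List.pyGetD_of_nonneg _ _ (by omega)]
      exact PySem.List.getD_map_range _ _ _ _ (by omega)
    rw [h1, h2, h3, h4]
    simp only [decide_eq_true_eq, not_and]
    intro ha hb
    exact htot (by omega)
  rfl

-- sorting the pairs lexicographically and projecting the costs = sorting the costs
theorem pvSortedFst (vs : List (Int × Int)) :
    (PySem.List.sorted2 vs (fun p => p.1) (fun p => p.2)).map Prod.fst =
      PySem.List.sorted (vs.map Prod.fst) (fun c => c) := by
  have hbf : (fun (a b : Int × Int) =>
        decide (a.1 < b.1) || (!decide (b.1 < a.1) && decide (a.2 < b.2))) =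
      (fun (a b : Int × Int) => decide ((toLex a : Lex (Int × Int)) < toLex b)) := by
    funext a b
    rcases a with ⟨a1, a2⟩
    rcases b with ⟨b1, b2⟩
    refine Bool.eq_iff_iff.mpr ?_
    simp only [Bool.or_eq_true, Bool.and_eq_true, Bool.not_eq_true',
      decide_eq_true_eq, decide_eq_false_iff_not, Prod.Lex.lt_iff, ofLex_toLex]
    omega
  have hs2 : PySem.List.sorted2 vs (fun p => p.1) (fun p => p.2) =
      PySem.List.sorted vs (fun p => (toLex p : Lex (Int × Int))) := by
    rw [PySem.List.sorted_eq_foldl_insertBy]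
    show vs.foldl (fun acc x => PySem.List.insertBy
      (fun a b => decide (a.1 < b.1) || (!decide (b.1 < a.1) && decide (a.2 < b.2))) x acc) [] = _
    rw [hbf]
  apply PySem.List.eq_of_perm_of_pairwise_le_of_injective (fun c : Int => c) (fun x y h => h)
  · exact ((PySem.List.sorted2_perm vs (fun p => p.1) (fun p => p.2) false).map Prod.fst).trans
      (PySem.List.sorted_perm (vs.map Prod.fst) (fun c => c) false).symm
  · rw [hs2]
    refine List.pairwise_map.mpr ?_
    refine (PySem.List.sorted_pairwise vs (fun p => (toLex p : Lex (Int × Int)))).imp ?_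
    intro a b h
    rcases Prod.Lex.le_iff.mp h with h' | ⟨h', -⟩
    · exact le_of_lt h'
    · exact le_of_eq h'
  · exact PySem.List.sorted_pairwise (vs.map Prod.fst) (fun c => c)

-- pvMaxTake facts
theorem pvMaxTake_le_length (cs : List Int) (j : Int) : pvMaxTake cs j ≤ cs.length := by
  induction cs generalizing j with
  | nil => simp [pvMaxTake]
  | cons c cs ih =>
    simp only [pvMaxTake]
    split
    · simpa using Nat.succ_le_succ (ih (j - c))
    · simp

theorem pvMaxTake_full (cs : List Int) (j : Int) (h : cs.sum ≤ j) (hnn : ∀ x ∈ cs, 0 ≤ x) :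
    pvMaxTake cs j = cs.length := by
  induction cs generalizing j with
  | nil => simp [pvMaxTake]
  | cons c cs ih =>
    have hnn' : ∀ x ∈ cs, 0 ≤ x := fun x hx => hnn x (List.mem_cons_of_mem _ hx)
    have hsum : 0 ≤ cs.sum := List.sum_nonneg hnn'
    simp only [List.sum_cons] at h
    have hc : c ≤ j := by omega
    simp only [pvMaxTake, if_pos hc, List.length_cons]
    rw [ih (j - c) (by omega) hnn']

theorem pvMaxTake_sum (cs : List Int) (j : Int) (hj : 0 ≤ j) :
    (cs.take (pvMaxTake cs j)).sum ≤ j := by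
  induction cs generalizing j with
  | nil => simpa [pvMaxTake]
  | cons c cs ih =>
    simp only [pvMaxTake]
    split
    · rename_i hc
      simp only [List.take_succ_cons, List.sum_cons]
      have := ih (j - c) (by omega)
      omega
    · simpa [pvMaxTake]

theorem pvMaxTake_feasible (cs : List Int) (hnn : ∀ x ∈ cs, 0 ≤ x) :
    ∀ (t : ℕ) (j : Int), t ≤ cs.length → (cs.take t).sum ≤ j → t ≤ pvMaxTake cs j := by
  induction cs with
  | nil => intro t j ht _; simpa [pvMaxTake] using ht
  | cons c cs ih =>
    intro t j ht hsum
    cases t with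
    | zero => exact Nat.zero_le _
    | succ t =>
      have hnn' : ∀ x ∈ cs, 0 ≤ x := fun x hx => hnn x (List.mem_cons_of_mem _ hx)
      simp only [List.take_succ_cons, List.sum_cons] at hsum
      have hts : 0 ≤ (cs.take t).sum := List.sum_nonneg (fun x hx => hnn' x (List.mem_of_mem_take hx))
      have hc : c ≤ j := by omega
      simp only [pvMaxTake, if_pos hc]
      have := ih hnn' t (j - c) (by simpa using ht) (by omega)
      omega

theorem pvMaxTake_mono (cs : List Int) : ∀ (j j' : Int), j ≤ j' → pvMaxTake cs j ≤ pvMaxTake cs j' := by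
  induction cs with
  | nil => intro j j' _; simp [pvMaxTake]
  | cons c cs ih =>
    intro j j' hjj
    simp only [pvMaxTake]
    split
    · rename_i hc
      rw [if_pos (by omega)]
      exact Nat.succ_le_succ (ih _ _ (by omega))
    · split
      · omega
      · exact le_refl _

theorem pvMaxTake_append (cs : List Int) (c : Int) (hc : 0 ≤ c) (hnn : ∀ x ∈ cs, 0 ≤ x) :
    ∀ j : Int, pvMaxTake (cs ++ [c]) j = if cs.sum + c ≤ j then cs.length + 1 else pvMaxTake cs j := by
  induction cs with
  | nil => intro j; simp [pvMaxTake]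
  | cons c0 cs ih =>
    intro j
    have hnn' : ∀ x ∈ cs, 0 ≤ x := fun x hx => hnn x (List.mem_cons_of_mem _ hx)
    have hc0 : 0 ≤ c0 := hnn c0 (List.mem_cons_self)
    have hsum : 0 ≤ cs.sum := List.sum_nonneg hnn'
    simp only [List.cons_append, pvMaxTake, List.sum_cons, List.length_cons]
    by_cases h0 : c0 ≤ j
    · rw [if_pos h0, if_pos h0, ih hnn' (j - c0)]
      split <;> rename_i hs
      · rw [if_pos (by omega)]
      · rw [if_neg (by omega)]
    · rw [if_neg h0, if_neg h0, if_neg (by omega)]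

theorem pvMaxTake_step_lo (cs : List Int) (c j : Int) (hc : 0 ≤ c) (hnn : ∀ x ∈ cs, 0 ≤ x)
    (hj : j < c) : pvMaxTake (cs ++ [c]) j = pvMaxTake cs j := by
  rw [pvMaxTake_append cs c hc hnn j]
  have : 0 ≤ cs.sum := List.sum_nonneg hnn
  rw [if_neg (by omega)]

theorem pvMaxTake_step_hi (cs : List Int) (c j : Int) (hc : 0 ≤ c) (hnn : ∀ x ∈ cs, 0 ≤ x)
    (hub : ∀ x ∈ cs, x ≤ c) (hj : c ≤ j) :
    pvMaxTake (cs ++ [c]) j = max (pvMaxTake cs j) (pvMaxTake cs (j - c) + 1) := by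
  rw [pvMaxTake_append cs c hc hnn j]
  split <;> rename_i hs
  · -- everything fits: the new item and all old ones
    have h1 : pvMaxTake cs (j - c) = cs.length := pvMaxTake_full cs (j - c) (by omega) hnn
    have h2 : pvMaxTake cs j ≤ cs.length := pvMaxTake_le_length cs j
    omega
  · -- the new item displaces at least one old one
    have hjc : 0 ≤ j - c := by omega
    set t := pvMaxTake cs (j - c) with ht
    have htle : t ≤ cs.length := pvMaxTake_le_length cs (j - c)
    have htlt : t < cs.length := by
      rcases Nat.lt_or_ge t cs.length with h | h
      · exact h
      · exfalso
        have hteq : t = cs.length := le_antisymm htle h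
        have := pvMaxTake_sum cs (j - c) hjc
        rw [← ht, hteq, List.take_of_length_le (le_refl _)] at this
        omega
    have hsum_t : (cs.take t).sum ≤ j - c := pvMaxTake_sum cs (j - c) hjc
    have hsucc : (cs.take (t + 1)).sum ≤ j := by
      rw [List.sum_take_succ cs t htlt]
      have : cs[t] ≤ c := hub _ (List.getElem_mem htlt)
      omega
    have := pvMaxTake_feasible cs hnn (t + 1) j (by omega) hsucc
    omega

-- descending inner-loop induction for pvInnerStep
theorem pvInnerAux (cs : List Int) (c k : Int) (hc : 0 ≤ c) (hnn : ∀ x ∈ cs, 0 ≤ x)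
    (hub : ∀ x ∈ cs, x ≤ c) : ∀ (n : ℕ) (j : Int), j = c - 1 + (n : Int) → j ≤ k →
    ∀ dp : List Int, dp.length = (k + 1).toNat →
    (∀ t : Int, 0 ≤ t → t ≤ k → PySem.List.pyGetD dp t 0 =
      if j < t then (pvMaxTake (cs ++ [c]) t : Int) else (pvMaxTake cs t : Int)) →
    ((PySem.List.pyRange j (c - 1) (-1)).foldl
        (fun dp j => PySem.List.pySetD dp j
          (max (PySem.List.pyGetD dp j 0) (PySem.List.pyGetD dp (j - c) 0 + 1))) dp).length
      = (k + 1).toNat ∧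
    ∀ t : Int, 0 ≤ t → t ≤ k →
      PySem.List.pyGetD ((PySem.List.pyRange j (c - 1) (-1)).foldl
        (fun dp j => PySem.List.pySetD dp j
          (max (PySem.List.pyGetD dp j 0) (PySem.List.pyGetD dp (j - c) 0 + 1))) dp) t 0
        = (pvMaxTake (cs ++ [c]) t : Int) := by
  intro n
  induction n with
  | zero =>
    intro j hj hjk dp hlen hdp
    rw [PySem.List.pyRange_neg_one_eq_nil (by omega)]
    simp only [List.foldl_nil]
    refine ⟨hlen, ?_⟩
    intro t ht htk
    rw [hdp t ht htk]
    by_cases hlt : j < t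
    · rw [if_pos hlt]
    · rw [if_neg hlt, pvMaxTake_step_lo cs c t hc hnn (by omega)]
  | succ n ih =>
    intro j hj hjk dp hlen hdp
    have hcj : c ≤ j := by omega
    have hj0 : 0 ≤ j := by omega
    rw [PySem.List.pyRange_neg_one_cons (by omega)]
    simp only [List.foldl_cons]
    have hvj : PySem.List.pyGetD dp j 0 = (pvMaxTake cs j : Int) := by
      rw [hdp j hj0 hjk, if_neg (lt_irrefl j)]
    have hvjc : PySem.List.pyGetD dp (j - c) 0 = (pvMaxTake cs (j - c) : Int) := by
      rw [hdp (j - c) (by omega) (by omega), if_neg (by omega)]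
    have hv : max (PySem.List.pyGetD dp j 0) (PySem.List.pyGetD dp (j - c) 0 + 1) =
        (pvMaxTake (cs ++ [c]) j : Int) := by
      rw [hvj, hvjc, pvMaxTake_step_hi cs c j hc hnn hub hcj]
      push_cast
      omega
    rw [hv]
    refine ih (j - 1) (by omega) (by omega) _ ?_ ?_
    · rw [PySem.List.length_pySetD, hlen]
    · intro t ht htk
      have hjn : ((j.toNat : Int)) = j := Int.toNat_of_nonneg hj0
      have htn : ((t.toNat : Int)) = t := Int.toNat_of_nonneg ht
      rw [← hjn, ← htn,
        PySem.List.pyGetD_pySetD_natCast dp j.toNat t.toNat _ 0 (by omega)]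
      by_cases heq : t.toNat = j.toNat
      · rw [if_pos heq, if_pos (by omega)]
        have : t = j := by omega
        rw [this]
      · rw [if_neg heq, htn, hdp t ht htk]
        by_cases hlt : j < t
        · rw [if_pos hlt, if_pos (by omega)]
        · rw [if_neg hlt, if_neg (by omega)]

-- the inner DP loop of A performs one pvMaxTake append step
theorem pvInnerStep (cs : List Int) (c k : Int) (hc : 0 ≤ c) (hnn : ∀ x ∈ cs, 0 ≤ x)
    (hub : ∀ x ∈ cs, x ≤ c) (dp : List Int) (hlen : dp.length = (k + 1).toNat)
    (hdp : ∀ t : Int, 0 ≤ t → t ≤ k → PySem.List.pyGetD dp t 0 = (pvMaxTake cs t : Int)) :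
    (pvA_inner k c dp).length = (k + 1).toNat ∧
      ∀ t : Int, 0 ≤ t → t ≤ k →
        PySem.List.pyGetD (pvA_inner k c dp) t 0 = (pvMaxTake (cs ++ [c]) t : Int) := by
  unfold pvA_inner
  by_cases hck : c ≤ k
  · refine pvInnerAux cs c k hc hnn hub (k - c + 1).toNat k (by omega) (le_refl k) dp hlen ?_
    intro t ht htk
    rw [if_neg (by omega)]
    exact hdp t ht htk
  · rw [PySem.List.pyRange_neg_one_eq_nil (by omega)]
    simp only [List.foldl_nil]
    refine ⟨hlen, ?_⟩
    intro t ht htk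
    rw [hdp t ht htk, pvMaxTake_step_lo cs c t hc hnn (by omega)]

-- the outer DP loop of A computes pvMaxTake of the processed cost list
theorem pvOuter (s : List Int) : ∀ (pre : List Int) (k : Int) (dp : List Int),
    (∀ x ∈ pre ++ s, 0 ≤ x) → (pre ++ s).Pairwise (· ≤ ·) →
    dp.length = (k + 1).toNat →
    (∀ t : Int, 0 ≤ t → t ≤ k → PySem.List.pyGetD dp t 0 = (pvMaxTake pre t : Int)) →
    (s.foldl (fun dp c => pvA_inner k c dp) dp).length = (k + 1).toNat ∧
      ∀ t : Int, 0 ≤ t → t ≤ k →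
        PySem.List.pyGetD (s.foldl (fun dp c => pvA_inner k c dp) dp) t 0 =
          (pvMaxTake (pre ++ s) t : Int) := by
  induction s with
  | nil =>
    intro pre k dp hnn hp hlen hdp
    simp only [List.foldl_nil, List.append_nil]
    exact ⟨hlen, hdp⟩
  | cons c s' ih =>
    intro pre k dp hnn hp hlen hdp
    simp only [List.foldl_cons]
    have hc0 : 0 ≤ c := hnn c (by simp)
    have hnnpre : ∀ x ∈ pre, 0 ≤ x := fun x hx => hnn x (List.mem_append_left _ hx)
    have hub : ∀ x ∈ pre, x ≤ c := by
      intro x hx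
      exact (List.pairwise_append.mp hp).2.2 x hx c (List.mem_cons_self)
    obtain ⟨hlen1, hdp1⟩ := pvInnerStep pre c k hc0 hnnpre hub dp hlen hdp
    have hassoc : (pre ++ [c]) ++ s' = pre ++ c :: s' := by simp
    have := ih (pre ++ [c]) k (pvA_inner k c dp)
      (by rw [hassoc]; exact hnn) (by rw [hassoc]; exact hp) hlen1 hdp1
    rwa [hassoc] at this

-- extracting max(dp)
theorem pvMaxDp (dp : List Int) (k : Int) (cs : List Int) (hk : 0 ≤ k)
    (hlen : dp.length = (k + 1).toNat)
    (hdp : ∀ t : Int, 0 ≤ t → t ≤ k → PySem.List.pyGetD dp t 0 = (pvMaxTake cs t : Int)) :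
    PySem.List.max? dp (fun x => x) = some ((pvMaxTake cs k : Int)) := by
  have hne : dp ≠ [] := by
    intro h; rw [h] at hlen; simp at hlen; omega
  obtain ⟨m, hm⟩ : ∃ m, PySem.List.max? dp (fun x => x) = some m := by
    cases h : PySem.List.max? dp (fun x => x) with
    | none => exact absurd ((PySem.List.max?_eq_none_iff dp (fun x => x)).mp h) hne
    | some m => exact ⟨m, rfl⟩
  have hmem : m ∈ dp := PySem.List.max?_mem hm
  have hmax : ∀ y ∈ dp, y ≤ m := by
    intro y hy; exact PySem.List.max?_isMax hm y hy
  -- every entry is pvMaxTake cs t for some 0 ≤ t ≤ k, and dp[k] is an entry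
  have hkidx : k.toNat < dp.length := by omega
  have hgetk : dp[k.toNat] = (pvMaxTake cs k : Int) := by
    have h0 := hdp k hk (le_refl k)
    rwa [PySem.List.pyGetD_eq_getElem dp 0 hk (by omega)] at h0
  have hle1 : (pvMaxTake cs k : Int) ≤ m := by
    rw [← hgetk]; exact hmax _ (List.getElem_mem hkidx)
  have hle2 : m ≤ (pvMaxTake cs k : Int) := by
    obtain ⟨i, hi, hieq⟩ := List.mem_iff_getElem.mp hmem
    have h1 : ((i : Int)) ≤ k := by omega
    have h2 := hdp i (by exact_mod_cast Int.natCast_nonneg i) h1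
    rw [PySem.List.pyGetD_eq_getElem dp 0 (by exact_mod_cast Int.natCast_nonneg i) (by omega)] at h2
    simp only [Int.toNat_natCast] at h2
    rw [← hieq, h2]
    exact_mod_cast pvMaxTake_mono cs i k h1
  rw [hm, le_antisymm hle2 hle1]

-- B's greedy pass counts pvMaxTake on a sorted list
theorem pvGreedy (cs : List Int) : ∀ (hs : cs.Pairwise (· ≤ ·)) (n r : Int),
    (cs.foldl pvB_gstep (n, r)).1 = n + (pvMaxTake cs r : Int) := by
  induction cs with
  | nil => intro _ n r; simp [pvMaxTake]
  | cons c cs ih =>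
    intro hs n r
    have hs' : cs.Pairwise (· ≤ ·) := hs.of_cons
    have hhead : ∀ x ∈ cs, c ≤ x := fun x hx => (List.pairwise_cons.mp hs).1 x hx
    simp only [List.foldl_cons, pvB_gstep, pvMaxTake]
    by_cases hc : c ≤ r
    · rw [if_pos hc, if_pos hc, ih hs' (n + 1) (r - c)]
      push_cast; ring
    · rw [if_neg hc, if_neg hc, ih hs' n r]
      have : pvMaxTake cs r = 0 := by
        cases cs with
        | nil => rfl
        | cons c' cs' =>
          have : c ≤ c' := hhead c' (List.mem_cons_self)
          simp only [pvMaxTake]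
          rw [if_neg (by omega)]
      simp [this]

theorem pvRefPairs_fst (arr : List Int) (N : Int) :
    (pvRefPairs arr N).map Prod.fst = pvRefCosts arr N := by
  unfold pvRefPairs pvRefCosts
  rw [List.map_map]
  rfl

theorem pvRepGetD (k : Int) : ∀ t : Int, 0 ≤ t → t ≤ k →
    PySem.List.pyGetD (List.replicate (k + 1).toNat (0 : Int)) t 0 = ((pvMaxTake [] t : ℕ) : Int) := by
  intro t ht htk
  rw [PySem.List.pyGetD_of_nonneg _ _ ht]
  simp only [pvMaxTake, Nat.cast_zero]
  rcases Nat.lt_or_ge t.toNat (k + 1).toNat with h | h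
  · rw [List.getD_eq_getElem _ _ (by simpa using h), List.getElem_replicate]
  · rw [List.getD_eq_default _ _ (by simpa using h)]

-- ===== VERDICT (by name: the statement is the Claim_ definition above) =====
theorem max_separations_spec : Claim_equal_max_separations := by
  intro N arr k _ hPre
  obtain ⟨hNlen, hk⟩ := hPre
  unfold Spec_max_separations
  by_cases hN : N ≤ 0
  · -- no iterations at all: A returns max of the all-zero dp table, B returns 0
    have e1 : PySem.List.pyRange 1 (N + 1) 1 = [] := PySem.List.pyRange_one_eq_nil (by omega)
    have e2 : PySem.List.pyRange 1 N 1 = [] := PySem.List.pyRange_one_eq_nil (by omega)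
    have e3 : PySem.List.sorted2 ([] : List (Int × Int)) (fun p => p.1) (fun p => p.2) = [] := rfl
    simp only [max_separations, max_separations_alt, e1, e2, e3, List.foldl_nil, if_pos hN]
    rw [pvMaxDp _ k [] hk (by simp) (pvRepGetD k)]
    simp [pvMaxTake]
  · have hNlen' : N ≤ (arr.length : Int) := hNlen.resolve_right (by omega)
    set m := N.toNat with hmdef
    have hmN : (m : Int) = N := Int.toNat_of_nonneg (by omega)
    have hmlen : m ≤ arr.length := by omega
    have hm1 : 1 ≤ m := by omega
    simp only [max_separations, max_separations_alt, if_neg hN]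
    rw [← hmN]
    rw [pvCountsA arr m hmlen]
    have hbf := pvBfold arr (m - 1) (by omega)
    rw [show ((m - 1 : ℕ) : Int) + 1 = (m : Int) by omega] at hbf
    rw [hbf]
    rw [show PySem.List.pyGetD arr ((m : Int) - 1) 0 = (arr[m - 1] : Int) by
      rw [show (m : Int) - 1 = ((m - 1 : ℕ) : Int) by omega]
      simp only [PySem.List.pyGetD_natCast]
      exact List.getD_eq_getElem arr 0 (by omega)]
    rw [show pvOddc (arr.take (m - 1)) - pvEvenc (arr.take (m - 1)) +
        (if PySem.Int.mod (arr[m - 1]) 2 ≠ 0 then 1 else -1) =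
        pvOddc (arr.take m) - pvEvenc (arr.take m) by
      have h1 := pvOddc_take_succ arr (m - 1) (by omega)
      have h2 := pvEvenc_take_succ arr (m - 1) (by omega)
      rw [show m - 1 + 1 = m by omega] at h1 h2
      rw [h1, h2]
      by_cases hx : PySem.Int.mod (arr[m - 1]) 2 ≠ 0
      · rw [if_pos hx, if_pos hx, if_neg hx]; omega
      · rw [if_neg hx, if_neg hx, if_pos (not_not.mp hx)]; omega]
    by_cases hDz : pvOddc (arr.take m) - pvEvenc (arr.take m) = 0
    · -- balanced total: both sides compute the greedy optimum
      rw [if_neg (not_not.mpr hDz)]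
      have hvs := pvVsA_bal arr ((m : Int)) (by omega) (by omega)
        (by simpa using hDz)
      simp only [Int.toNat_natCast] at hvs
      rw [hvs]
      rw [show List.foldl (fun dp p => pvA_inner k p.1 dp)
            (List.replicate (k + 1).toNat 0)
            (PySem.List.sorted2 (pvRefPairs arr (m : Int)) (fun p => p.1) (fun p => p.2)) =
          List.foldl (fun dp c => pvA_inner k c dp) (List.replicate (k + 1).toNat 0)
            ((PySem.List.sorted2 (pvRefPairs arr (m : Int)) (fun p => p.1) (fun p => p.2)).map
              Prod.fst) from (List.foldl_map (f := Prod.fst) (g := fun dp c => pvA_inner k c dp)).symm]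
      rw [pvSortedFst, pvRefPairs_fst]
      set cs := PySem.List.sorted (pvRefCosts arr (m : Int)) (fun c => c) with hcs
      have hnn : ∀ x ∈ cs, 0 ≤ x := by
        intro x hx
        have hx' : x ∈ pvRefCosts arr (m : Int) :=
          (PySem.List.sorted_perm _ _ _).mem_iff.mp hx
        obtain ⟨i, -, rfl⟩ := List.mem_map.mp hx'
        exact abs_nonneg _
      have hpw : cs.Pairwise (· ≤ ·) := PySem.List.sorted_pairwise _ (fun c => c)
      obtain ⟨hlenf, hdpf⟩ := pvOuter cs [] k (List.replicate (k + 1).toNat 0)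
        (by simpa using hnn) (by simpa using hpw) (by simp) (pvRepGetD k)
      simp only [List.nil_append] at hdpf
      rw [pvMaxDp _ k cs hk hlenf hdpf]
      rw [pvGreedy cs hpw 0 k]
      simp
    · -- unbalanced total: no valid separation point, both sides return 0
      rw [if_pos hDz]
      have hvs := pvVsA_unbal arr ((m : Int)) (by omega) (by omega)
        (by simpa using hDz)
      simp only [Int.toNat_natCast] at hvs
      rw [hvs]
      have e3 : PySem.List.sorted2 ([] : List (Int × Int)) (fun p => p.1) (fun p => p.2) = [] := rfl
      rw [e3]
      simp only [List.foldl_nil]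
      rw [pvMaxDp _ k [] hk (by simp) (pvRepGetD k)]
      simp [pvMaxTake]
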